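-- pv_equiv track=rewrite | github.com/Santiago0521/Python | Interpolacion.py | construir_polinomio_interpolacion
-- ===== SOURCE A (Python) =====
-- def construir_polinomio_interpolacion(valores_x, coeficientes):
--     n = len(valores_x)
--     interpolacion = str(coeficientes[0])
--     for i in range(1, n):
--         termino = str(coeficientes[i])
--         for j in range(i):
--             termino += "*(x - " + str(valores_x[j]) + ")"
--         interpolacion += " + " + termino
--     return interpolacion
-- ===== SOURCE B (Python) =====
-- def construir_polinomio_interpolacion(valores_x, coeficientes):
--     resultado = str(coeficientes[0])
--     producto = ""
--     for x, c in zip(valores_x[:-1], coeficientes[1:]):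
--         producto += "*(x - " + str(x) + ")"
--         resultado += " + " + str(c) + producto
--     return resultado
-- ===== Notes on version B (the rewrite author's own statement) =====
-- stated objective: faster
-- what changed: B makes a single index-free pass over zip(valores_x[:-1], coeficientes[1:]), extending one running product string by one factor per step, instead of A's inner loop that rebuilds the whole factor product for every term.
-- outside the precondition, e.g. on construir_polinomio_interpolacion([1, 2], [5]): A raises IndexError, B returns '5'; on construir_polinomio_interpolacion([1], []): A raises IndexError, B raises IndexError
import Mathlib
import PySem

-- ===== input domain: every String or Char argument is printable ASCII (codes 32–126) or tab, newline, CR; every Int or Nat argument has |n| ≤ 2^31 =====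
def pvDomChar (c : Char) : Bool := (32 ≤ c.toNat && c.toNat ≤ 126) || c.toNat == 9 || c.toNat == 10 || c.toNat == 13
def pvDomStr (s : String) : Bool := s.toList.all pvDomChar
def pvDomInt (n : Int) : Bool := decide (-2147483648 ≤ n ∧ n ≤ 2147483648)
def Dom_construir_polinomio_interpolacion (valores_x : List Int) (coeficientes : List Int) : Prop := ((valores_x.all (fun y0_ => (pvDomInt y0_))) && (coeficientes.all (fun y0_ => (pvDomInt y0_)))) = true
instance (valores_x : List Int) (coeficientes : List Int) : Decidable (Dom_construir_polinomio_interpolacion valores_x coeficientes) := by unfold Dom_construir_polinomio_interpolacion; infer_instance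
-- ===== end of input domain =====

-- B replaces A's inner factor-rebuilding loop by a single index-free pass over
-- zip(valores_x[:-1], coeficientes[1:]) with one running product string (faster).

-- ===== PORT A =====
def construir_polinomio_interpolacion (valores_x : List Int) (coeficientes : List Int) : String :=
  (PySem.List.pyRange 1 (PySem.List.len valores_x)).foldl
    (fun interpolacion i =>
      interpolacion ++ (" + " ++
        (PySem.List.pyRange 0 i).foldl
          (fun termino j =>
            termino ++ ("*(x - " ++ PySem.Int.toStr (PySem.List.pyGetD valores_x j 0) ++ ")"))
          (PySem.Int.toStr (PySem.List.pyGetD coeficientes i 0))))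
    (PySem.Int.toStr (PySem.List.pyGetD coeficientes 0 0))

-- ===== PORT B =====
-- valores_x[:-1] is List.dropLast, coeficientes[1:] is List.drop 1 (exact for lists);
-- the loop state is the pair (resultado, producto).
def construir_polinomio_interpolacion_alt (valores_x : List Int) (coeficientes : List Int) : String :=
  ((valores_x.dropLast.zip (coeficientes.drop 1)).foldl
    (fun st xc =>
      let producto := st.2 ++ ("*(x - " ++ PySem.Int.toStr xc.1 ++ ")")
      (st.1 ++ (" + " ++ PySem.Int.toStr xc.2 ++ producto), producto))
    (PySem.Int.toStr (PySem.List.pyGetD coeficientes 0 0), "")).1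

-- ===== PRECONDITION & SPEC =====
-- Pre_ excludes exactly the inputs on which Python A raises IndexError:
-- coeficientes empty (coeficientes[0]) or shorter than valores_x (coeficientes[i]).
def Pre_construir_polinomio_interpolacion (valores_x : List Int) (coeficientes : List Int) : Prop :=
  coeficientes ≠ [] ∧ valores_x.length ≤ coeficientes.length
instance (valores_x : List Int) (coeficientes : List Int) : Decidable (Pre_construir_polinomio_interpolacion valores_x coeficientes) := by unfold Pre_construir_polinomio_interpolacion; infer_instance

def pvWitness_construir_polinomio_interpolacion : List Int × List Int := ([1, 2, 3], [4, -5, 6])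

def Spec_construir_polinomio_interpolacion (valores_x : List Int) (coeficientes : List Int) (out : String) : Prop := out = construir_polinomio_interpolacion_alt valores_x coeficientes
instance (valores_x : List Int) (coeficientes : List Int) (out : String) : Decidable (Spec_construir_polinomio_interpolacion valores_x coeficientes out) := by unfold Spec_construir_polinomio_interpolacion; infer_instance

-- ===== CLAIM (what is proved, stated in full; the proofs are below) =====
def Claim_equal_construir_polinomio_interpolacion : Prop := ∀ (valores_x : List Int) (coeficientes : List Int), Dom_construir_polinomio_interpolacion valores_x coeficientes → Pre_construir_polinomio_interpolacion valores_x coeficientes → Spec_construir_polinomio_interpolacion valores_x coeficientes (construir_polinomio_interpolacion valores_x coeficientes)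

-- ===== LEMMAS AND PROOFS =====

-- the factor string "*(x - v)"
def pvFac (v : Int) : String := "*(x - " ++ PySem.Int.toStr v ++ ")"

-- the product of the factors for indices j = 0 … i-1 of valores_x (A's inner loop from "")
def pvP (valores_x : List Int) (i : Int) : String :=
  (PySem.List.pyRange 0 i).foldl (fun t j => t ++ pvFac (PySem.List.pyGetD valores_x j 0)) ""

theorem pv_strfold_append (f : Int → String) (l : List Int) (s : String) :
    l.foldl (fun t j => t ++ f j) s = s ++ l.foldl (fun t j => t ++ f j) "" := by
  induction l generalizing s with
  | nil => simp
  | cons a l ih =>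
    simp only [List.foldl_cons]
    rw [ih (s ++ f a), ih ("" ++ f a)]
    simp [String.append_assoc]

theorem pvP_succ (valores_x : List Int) (m : Int) (hm : 0 ≤ m) :
    pvP valores_x (m + 1) = pvP valores_x m ++ pvFac (PySem.List.pyGetD valores_x m 0) := by
  unfold pvP
  rw [PySem.List.pyRange_one_succ_right hm, List.foldl_append]
  simp

-- A's fold over indices 1 … m (as Nats), in closed range form
def pvSA (valores_x coeficientes : List Int) (m : Nat) : String :=
  (List.range m).foldl
    (fun acc (k : Nat) =>
      acc ++ (" + " ++ (PySem.Int.toStr (PySem.List.pyGetD coeficientes ((k : Int) + 1) 0)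
        ++ pvP valores_x ((k : Int) + 1))))
    (PySem.Int.toStr (PySem.List.pyGetD coeficientes 0 0))

-- B's fold with the pair state, in the same index form
def pvSB (valores_x coeficientes : List Int) (m : Nat) : String × String :=
  (List.range m).foldl
    (fun st k =>
      let producto := st.2 ++ ("*(x - " ++ PySem.Int.toStr (valores_x.getD k 0) ++ ")")
      (st.1 ++ (" + " ++ PySem.Int.toStr (coeficientes.getD (k + 1) 0) ++ producto), producto))
    (PySem.Int.toStr (PySem.List.pyGetD coeficientes 0 0), "")

-- the joint invariant of the two index folds
theorem pv_invariant (valores_x coeficientes : List Int) (m : Nat) :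
    pvSA valores_x coeficientes m = (pvSB valores_x coeficientes m).1 ∧
      (pvSB valores_x coeficientes m).2 = pvP valores_x m := by
  induction m with
  | zero =>
    constructor
    · rfl
    · unfold pvSB pvP
      simp only [Nat.cast_zero]
      rw [PySem.List.pyRange_one_eq_nil (le_refl 0)]
      rfl
  | succ m ih =>
    obtain ⟨ih1, ih2⟩ := ih
    unfold pvSA pvSB
    rw [List.range_succ, List.foldl_append, List.foldl_append]
    simp only [List.foldl_cons, List.foldl_nil]
    have hA : pvSA valores_x coeficientes m = (List.range m).foldl
        (fun acc (k : Nat) =>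
          acc ++ (" + " ++ (PySem.Int.toStr (PySem.List.pyGetD coeficientes ((k : Int) + 1) 0)
            ++ pvP valores_x ((k : Int) + 1))))
        (PySem.Int.toStr (PySem.List.pyGetD coeficientes 0 0)) := rfl
    have hB : pvSB valores_x coeficientes m = (List.range m).foldl
        (fun st k =>
          let producto := st.2 ++ ("*(x - " ++ PySem.Int.toStr (valores_x.getD k 0) ++ ")")
          (st.1 ++ (" + " ++ PySem.Int.toStr (coeficientes.getD (k + 1) 0) ++ producto), producto))
        (PySem.Int.toStr (PySem.List.pyGetD coeficientes 0 0), "") := rfl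
    rw [← hA, ← hB, ih1, ih2]
    have hc : PySem.List.pyGetD coeficientes ((m : Int) + 1) 0 = coeficientes.getD (m + 1) 0 := by
      rw [show ((m : Int) + 1) = ((m + 1 : Nat) : Int) by push_cast; ring,
        PySem.List.pyGetD_natCast]
    have hx : PySem.List.pyGetD valores_x (m : Int) 0 = valores_x.getD m 0 := by
      rw [PySem.List.pyGetD_natCast]
    have hP : pvP valores_x ((m : Int) + 1)
        = pvP valores_x m ++ ("*(x - " ++ PySem.Int.toStr (valores_x.getD m 0) ++ ")") := by
      rw [pvP_succ valores_x m (by positivity), hx]; rfl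
    constructor
    · rw [hc, hP]; simp [String.append_assoc]
    · rw [show ((m + 1 : Nat) : Int) = (m : Int) + 1 by push_cast; ring, hP]

-- A's port equals the index form pvSA at m = n - 1
theorem pv_A_eq (valores_x coeficientes : List Int) :
    construir_polinomio_interpolacion valores_x coeficientes
      = pvSA valores_x coeficientes (valores_x.length - 1) := by
  unfold construir_polinomio_interpolacion pvSA
  rw [PySem.List.len_eq, PySem.List.pyRange_one,
    show (((valores_x.length : Int)) - 1).toNat = valores_x.length - 1 by omega,
    List.foldl_map]
  apply PySem.List.foldl_congr_mem
  intro acc k _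
  have hinner : (PySem.List.pyRange 0 ((1 : Int) + (k : Int))).foldl
      (fun termino j =>
        termino ++ ("*(x - " ++ PySem.Int.toStr (PySem.List.pyGetD valores_x j 0) ++ ")"))
      (PySem.Int.toStr (PySem.List.pyGetD coeficientes ((1 : Int) + (k : Int)) 0))
      = PySem.Int.toStr (PySem.List.pyGetD coeficientes ((1 : Int) + (k : Int)) 0)
        ++ pvP valores_x ((1 : Int) + (k : Int)) := by
    rw [pv_strfold_append (fun j => "*(x - " ++ PySem.Int.toStr (PySem.List.pyGetD valores_x j 0) ++ ")")]
    rfl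
  rw [hinner, show ((1 : Int) + (k : Int)) = (k : Int) + 1 by ring]

-- under Pre_, B's zip list is the index list of pairs
theorem pv_zip_eq (valores_x coeficientes : List Int)
    (h : valores_x.length ≤ coeficientes.length) :
    valores_x.dropLast.zip (coeficientes.drop 1)
      = (List.range (valores_x.length - 1)).map
          (fun k => (valores_x.getD k 0, coeficientes.getD (k + 1) 0)) := by
  apply List.ext_getElem
  · simp only [List.length_zip, List.length_dropLast, List.length_drop, List.length_map,
      List.length_range]
    omega
  · intro i h1 h2
    simp only [List.length_zip, List.length_dropLast, List.length_drop] at h1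
    have hi : i < valores_x.length - 1 := by omega
    simp only [List.getElem_zip, List.getElem_map, List.getElem_range, List.getElem_dropLast,
      List.getElem_drop, Prod.mk.injEq]
    constructor
    · rw [List.getD_eq_getElem valores_x 0 (by omega)]
    · rw [List.getD_eq_getElem coeficientes 0 (by omega)]
      congr 1
      omega

-- B's port equals the index form pvSB at m = n - 1 (under Pre_)
theorem pv_B_eq (valores_x coeficientes : List Int)
    (h : valores_x.length ≤ coeficientes.length) :
    construir_polinomio_interpolacion_alt valores_x coeficientes
      = (pvSB valores_x coeficientes (valores_x.length - 1)).1 := by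
  unfold construir_polinomio_interpolacion_alt pvSB
  rw [pv_zip_eq valores_x coeficientes h, List.foldl_map]

-- ===== VERDICT (by name: the statement is the Claim_ definition above) =====
theorem construir_polinomio_interpolacion_spec : Claim_equal_construir_polinomio_interpolacion := by
  intro valores_x coeficientes _ hpre
  unfold Spec_construir_polinomio_interpolacion
  rw [pv_A_eq, pv_B_eq valores_x coeficientes hpre.2]
  exact (pv_invariant valores_x coeficientes (valores_x.length - 1)).1
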